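-- pv_equiv track=rewrite | github.com/ThibautNottebaere/algo-en-data | 8dubbels.py | dubbels
-- ===== SOURCE A (Python) =====
-- def dubbels(list):
--     dict = {}
--     lijst_eenmaal = set()
--     lijst_tweemaal = set()
--
--     for item in list:
--         if item not in dict:
--             dict[item] = 1
--         else:
--             dict[item] += 1
--     for key in dict:
--         if dict[key] == 1:
--             lijst_eenmaal.add(key)
--         else:
--             lijst_tweemaal.add(key)
--     return lijst_eenmaal, lijst_tweemaal
-- ===== SOURCE B (Python) =====
-- def dubbels(list):
--     eenmaal = {x for x in list if list.count(x) == 1}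
--     tweemaal = {x for x in list if list.count(x) > 1}
--     return eenmaal, tweemaal
-- ===== Notes on version B (the rewrite author's own statement) =====
-- stated objective: simpler
-- what changed: The counting dict and the separate classification pass over its keys are replaced by two set comprehensions that classify each element directly by list.count(x).
import Mathlib
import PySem

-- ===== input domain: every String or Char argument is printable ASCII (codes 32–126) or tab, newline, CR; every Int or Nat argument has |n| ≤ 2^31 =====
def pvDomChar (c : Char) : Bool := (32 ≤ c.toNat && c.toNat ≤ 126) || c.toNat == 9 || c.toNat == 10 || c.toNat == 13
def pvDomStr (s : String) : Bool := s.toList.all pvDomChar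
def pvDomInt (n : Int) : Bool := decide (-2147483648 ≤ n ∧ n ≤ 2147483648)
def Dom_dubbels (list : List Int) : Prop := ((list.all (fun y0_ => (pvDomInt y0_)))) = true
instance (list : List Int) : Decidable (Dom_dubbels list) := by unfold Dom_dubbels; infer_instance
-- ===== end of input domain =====

-- B replaces A's counting dict + second classification pass by two direct set
-- comprehensions keyed on list.count(x) (simpler; not faster).

-- ===== PORT A =====
def dubbels (list : List Int) : List Int × List Int :=
  let d : PySem.Dict Int Int := list.foldl
    (fun d item =>
      if !(d.contains item) then d.insert item 1
      else d.insert item (d.getD item 0 + 1))   -- dict[item] += 1: key is present in this branch, so getD is exact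
    PySem.Dict.empty
  d.keys.foldl
    (fun (p : PySem.Set Int × PySem.Set Int) key =>
      if d.getD key 0 == 1 then (PySem.Set.add p.1 key, p.2)   -- dict[key]: key ∈ d.keys, so getD is exact
      else (p.1, PySem.Set.add p.2 key))
    (PySem.Set.empty, PySem.Set.empty)

-- ===== PORT B =====
def dubbels_alt (list : List Int) : List Int × List Int :=
  (PySem.Set.ofList (list.filter (fun x => PySem.List.count list x == 1)),
   PySem.Set.ofList (list.filter (fun x => PySem.List.count list x > 1)))

-- ===== PRECONDITION & SPEC =====
def Spec_dubbels (list : List Int) (out : List Int × List Int) : Prop := out = dubbels_alt list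
instance (list : List Int) (out : List Int × List Int) : Decidable (Spec_dubbels list out) := by unfold Spec_dubbels; infer_instance

-- ===== CLAIM (what is proved, stated in full; the proofs are below) =====
def Claim_equal_dubbels : Prop := ∀ (list : List Int), Dom_dubbels list → Spec_dubbels list (dubbels list)

-- ===== LEMMAS AND PROOFS =====

-- A's counting loop builds exactly collections.Counter(list).
lemma dictA_eq_counter (l : List Int) :
    l.foldl (fun d item =>
      if !(d.contains item) then d.insert item 1
      else d.insert item (d.getD item 0 + 1)) PySem.Dict.empty
    = PySem.Dict.counter l := by
  rw [← PySem.Dict.foldl_insert_getD_add_one_eq_counter]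
  apply PySem.List.foldl_congr_mem
  intro d x _
  by_cases h : d.contains x = true
  · simp [h]
  · have h' : d.contains x = false := by simpa using h
    have h0 : d.getD x 0 = 0 := by rw [PySem.Dict.getD_of_not_contains (h := h')]
    simp [h, h0]

lemma add_filter (q : Int → Bool) (acc : List Int) (x : Int) :
    (PySem.Set.add acc x).filter q
    = if q x then PySem.Set.add (acc.filter q) x else acc.filter q := by
  by_cases hm : x ∈ acc <;> by_cases hq : q x <;>
    simp [PySem.Set.add, PySem.Set.contains, hm, hq, List.mem_filter]

lemma foldl_add_filter (q : Int → Bool) :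
    ∀ (l acc : List Int),
      (l.foldl PySem.Set.add acc).filter q
      = (l.filter q).foldl PySem.Set.add (acc.filter q) := by
  intro l
  induction l with
  | nil => intro acc; rfl
  | cons x t ih =>
    intro acc
    by_cases hq : q x <;>
      simp [List.foldl_cons, ih, add_filter, hq]

lemma ofList_filter (q : Int → Bool) (l : List Int) :
    (PySem.Set.ofList l).filter q = PySem.Set.ofList (l.filter q) := by
  rw [PySem.Set.ofList_eq_foldl, PySem.Set.ofList_eq_foldl, foldl_add_filter]
  rfl

-- A's classification loop over distinct keys splits them by the test.
lemma classify_fold (p : Int → Bool) :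
    ∀ (l s t : List Int), l.Nodup → (∀ x ∈ l, x ∉ s) → (∀ x ∈ l, x ∉ t) →
      l.foldl (fun (pr : List Int × List Int) k =>
        if p k then (PySem.Set.add pr.1 k, pr.2) else (pr.1, PySem.Set.add pr.2 k)) (s, t)
      = (s ++ l.filter p, t ++ l.filter (fun x => !(p x))) := by
  intro l
  induction l with
  | nil => intro s t _ _ _; simp
  | cons x xs ih =>
    intro s t hnd hs ht
    have hxs : x ∉ s := hs x (by simp)
    have hxt : x ∉ t := ht x (by simp)
    by_cases hp : p x
    · have : PySem.Set.add s x = s ++ [x] := by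
        simp [PySem.Set.add, PySem.Set.contains, hxs]
      simp only [List.foldl_cons, hp, if_pos, this]
      rw [ih (s ++ [x]) t hnd.of_cons
        (fun y hy => by
          have hne : y ≠ x := fun h => (List.nodup_cons.mp hnd).1 (h ▸ hy)
          simp [hs y (List.mem_cons_of_mem _ hy), hne])
        (fun y hy => ht y (List.mem_cons_of_mem _ hy))]
      simp [hp]
    · have : PySem.Set.add t x = t ++ [x] := by
        simp [PySem.Set.add, PySem.Set.contains, hxt]
      simp only [List.foldl_cons, hp, if_neg, this, Bool.not_eq_true]
      rw [ih s (t ++ [x]) hnd.of_cons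
        (fun y hy => hs y (List.mem_cons_of_mem _ hy))
        (fun y hy => by
          have hne : y ≠ x := fun h => (List.nodup_cons.mp hnd).1 (h ▸ hy)
          simp [ht y (List.mem_cons_of_mem _ hy), hne])]
      simp [hp]

-- ===== VERDICT (by name: the statement is the Claim_ definition above) =====
theorem dubbels_spec : Claim_equal_dubbels := by
  unfold Claim_equal_dubbels
  intro l _
  unfold Spec_dubbels dubbels dubbels_alt
  simp only [dictA_eq_counter, PySem.Dict.keys_counter]
  rw [classify_fold _ _ _ _ (PySem.Set.nodup_ofList l) (by simp [PySem.Set.empty])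
      (by simp [PySem.Set.empty])]
  simp only [PySem.Set.empty, List.nil_append, ofList_filter]
  have h1 : List.filter (fun x => ((PySem.Dict.counter l).getD x 0 == 1)) l
      = List.filter (fun x => PySem.List.count l x == 1) l := by
    refine List.filter_congr ?_
    intro x hx
    rw [PySem.Dict.getD_counter, Bool.eq_iff_iff]
    simp [PySem.List.count_eq]
  have h2 : List.filter (fun x => !((PySem.Dict.counter l).getD x 0 == 1)) l
      = List.filter (fun x => decide (PySem.List.count l x > 1)) l := by
    refine List.filter_congr ?_
    intro x hx
    have hc : 1 ≤ l.count x := List.one_le_count_iff.mpr hx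
    rw [PySem.Dict.getD_counter, Bool.eq_iff_iff]
    simp [PySem.List.count_eq]
    omega
  simp only [h1, h2]
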